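-- pv_equiv track=rewrite | github.com/seung-hun-h/algorithm | 0_4.programmers/back-end/summer/2.py | solution
-- ===== SOURCE A (Python) =====
-- import heapq
--
-- def solution(t, r):
--     answer = []
--     _dict = dict()
--     for idx, time in enumerate(t):
--         _dict[idx] = time
--     q = []
--     # 0 - 10000 시간까지
--     for time in range(10001):
--         delete = []
--         for key in _dict:
--             if _dict[key] == time:
--                 # 우선순위: 1. 등급 2. 도착시간 3. 아이디 크기
--                 heapq.heappush(q, [r[key], time, key])
--                 delete.append(key)
--
--         # 탑승 시간 지난 인원 삭제
--         while delete:
--             del _dict[delete.pop()]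
--         # 탑승
--         if q:
--             answer.append(heapq.heappop(q)[2])
--         if not _dict:
--             break
--     # 나머지
--     while q:
--         answer.append(heapq.heappop(q)[2])
--
--
--     return answer
-- ===== SOURCE B (Python) =====
-- import heapq
--
-- def solution(t, r):
--     # Bucket riders by arrival time, then walk the (few) distinct arrival times
--     # in sorted order, paying one boarding step per elapsed time unit only while
--     # the queue is non-empty -- instead of rescanning every rider at each of the
--     # 10001 time steps.
--     buckets = {}
--     for idx, time in enumerate(t):
--         if 0 <= time <= 10000:
--             buckets.setdefault(time, []).append(idx)
--     answer = []
--     q = []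
--     cur = 0
--     for time in sorted(buckets):
--         while q and cur < time:
--             answer.append(heapq.heappop(q)[2])
--             cur += 1
--         for idx in buckets[time]:
--             heapq.heappush(q, (r[idx], time, idx))
--         answer.append(heapq.heappop(q)[2])
--         cur = time + 1
--     while q:
--         answer.append(heapq.heappop(q)[2])
--     return answer
-- ===== Notes on version B (the rewrite author's own statement) =====
-- stated objective: faster
-- what changed: B buckets riders by arrival time once and walks only the sorted distinct arrival times (popping the heap one boarding step per elapsed time unit while it is non-empty), instead of A's rescan of every still-waiting rider at each of the 10001 simulated time steps.
import Mathlib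
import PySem

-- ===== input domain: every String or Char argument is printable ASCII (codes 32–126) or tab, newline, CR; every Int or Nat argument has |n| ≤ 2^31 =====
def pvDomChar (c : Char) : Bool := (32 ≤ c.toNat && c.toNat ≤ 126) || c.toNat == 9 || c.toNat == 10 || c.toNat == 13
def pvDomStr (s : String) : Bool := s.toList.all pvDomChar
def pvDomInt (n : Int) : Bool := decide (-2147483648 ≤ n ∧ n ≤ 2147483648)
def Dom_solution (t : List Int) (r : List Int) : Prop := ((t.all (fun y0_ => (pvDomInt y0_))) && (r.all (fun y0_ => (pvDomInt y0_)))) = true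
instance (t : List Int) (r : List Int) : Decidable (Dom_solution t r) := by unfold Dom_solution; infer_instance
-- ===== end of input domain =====

-- B buckets the riders by arrival time and walks only the sorted distinct arrival
-- times (popping the queue once per elapsed unit while it is non-empty), instead of
-- A's rescan of every waiting rider at each of the 10001 time steps; return value only
-- (neither version mutates its arguments).

-- ===== shared heapq transliteration (both Pythons call heapq.heappush/heappop) =====
-- Python's list comparison on [r, time, idx] is the lexicographic order on the triple.
def hlt (a b : Int × Int × Int) : Bool :=
  a.1 < b.1 || (a.1 == b.1 && (a.2.1 < b.2.1 || (a.2.1 == b.2.1 && a.2.2 < b.2.2)))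

def hget (q : List (Int × Int × Int)) (i : Nat) : Int × Int × Int := q.getD i (0, 0, 0)

-- heapq._siftdown(heap, startpos, pos); the fuel argument (called with fuel = pos) only
-- makes the while loop structurally total: pos strictly decreases, so fuel never runs out.
def siftdownLoop (newitem : Int × Int × Int) (startpos : Nat) :
    Nat → Nat → List (Int × Int × Int) → List (Int × Int × Int)
  | 0, pos, q => q.set pos newitem
  | fuel + 1, pos, q =>
    if startpos < pos then
      let parentpos := (pos - 1) / 2
      let parent := hget q parentpos
      if hlt newitem parent then
        siftdownLoop newitem startpos fuel parentpos (q.set pos parent)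
      else q.set pos newitem
    else q.set pos newitem

-- heapq._siftup(heap, pos): the child-chasing loop, then heap[pos] = newitem; _siftdown.
-- fuel = endpos bounds the loop: pos strictly increases below endpos.
def siftupLoop (endpos : Nat) (newitem : Int × Int × Int) (startpos : Nat) :
    Nat → Nat → List (Int × Int × Int) → List (Int × Int × Int)
  | 0, pos, q => siftdownLoop newitem startpos pos pos (q.set pos newitem)
  | fuel + 1, pos, q =>
    if 2 * pos + 1 < endpos then
      let childpos := 2 * pos + 1
      let childpos2 :=
        if childpos + 1 < endpos && !(hlt (hget q childpos) (hget q (childpos + 1))) then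
          childpos + 1
        else childpos
      siftupLoop endpos newitem startpos fuel childpos2 (q.set pos (hget q childpos2))
    else siftdownLoop newitem startpos pos pos (q.set pos newitem)

-- heapq.heappush(q, x)
def hpush (q : List (Int × Int × Int)) (x : Int × Int × Int) : List (Int × Int × Int) :=
  siftdownLoop x 0 q.length q.length (q ++ [x])

-- heapq.heappop(q) on a non-empty q: (returned item, remaining heap)
def hpop (q : List (Int × Int × Int)) : (Int × Int × Int) × List (Int × Int × Int) :=
  let lastelt := hget q (q.length - 1)
  let rest := q.take (q.length - 1)
  if rest = [] then (lastelt, [])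
  else (hget rest 0, siftupLoop rest.length lastelt 0 rest.length 0 (rest.set 0 lastelt))

-- the trailing `while q: answer.append(heapq.heappop(q)[2])`; each pop shortens the
-- heap by one, so fuel = q.length (as drainAll passes it) is exactly enough.
def drain : Nat → List (Int × Int × Int) → List Int → List Int
  | 0, _, ans => ans
  | fuel + 1, q, ans =>
    if q = [] then ans else drain fuel (hpop q).2 (ans ++ [(hpop q).1.2.2])

def drainAll (q : List (Int × Int × Int)) (ans : List Int) : List Int :=
  drain q.length q ans

-- ===== PORT A =====

def loopA (r : List Int) : List Int → List Int → PySem.Dict Int Int → List (Int × Int × Int) → List Int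
  | [], ans, _, q => drainAll q ans
  | time :: rest, ans, d, q =>
    -- for key in _dict: if _dict[key] == time: heappush(q, [r[key], time, key]); delete.append(key)
    let s := d.keys.foldl
      (fun (s : List (Int × Int × Int) × List Int) key =>
        if d.getD key 0 == time then
          (hpush s.1 (PySem.List.pyGetD r key 0, time, key), s.2 ++ [key])
        else s) (q, [])
    -- while delete: del _dict[delete.pop()]
    let d2 := s.2.reverse.foldl (fun d k => PySem.Dict.erase d k) d
    -- if q: answer.append(heapq.heappop(q)[2])
    let ans2 := if s.1 = [] then ans else ans ++ [(hpop s.1).1.2.2]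
    let q2 := if s.1 = [] then s.1 else (hpop s.1).2
    -- if not _dict: break  (the trailing while-drain follows the break)
    if d2.size = 0 then drainAll q2 ans2 else loopA r rest ans2 d2 q2

def solution (t : List Int) (r : List Int) : List Int :=
  let d := (PySem.List.enumerate t).foldl
    (fun (d : PySem.Dict Int Int) p => d.insert p.1 p.2) PySem.Dict.empty
  loopA r (PySem.List.pyRange 0 10001) [] d []

-- ===== PORT B =====
-- while q and cur < time: answer.append(heapq.heappop(q)[2]); cur += 1
-- (fuel = (T - cur).toNat bounds the loop: cur increases strictly towards T)
def catchup : Nat → Int → List Int → List (Int × Int × Int) → Int → List Int × List (Int × Int × Int) × Int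
  | 0, _, ans, q, cur => (ans, q, cur)
  | fuel + 1, T, ans, q, cur =>
    if ¬(q = []) ∧ cur < T then
      catchup fuel T (ans ++ [(hpop q).1.2.2]) (hpop q).2 (cur + 1)
    else (ans, q, cur)

def loopB (r : List Int) (buckets : PySem.Dict Int (List Int)) :
    List Int → List Int → List (Int × Int × Int) → Int → List Int
  | [], ans, q, _ => drainAll q ans
  | T :: rest, ans, q, cur =>
    let c := catchup (T - cur).toNat T ans q cur
    -- for idx in buckets[time]: heappush(q, (r[idx], time, idx))
    let q2 := (buckets.getD T []).foldl
      (fun q idx => hpush q (PySem.List.pyGetD r idx 0, T, idx)) c.2.1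
    -- answer.append(heapq.heappop(q)[2]); cur = time + 1
    loopB r buckets rest (c.1 ++ [(hpop q2).1.2.2]) (hpop q2).2 (T + 1)

def solution_alt (t : List Int) (r : List Int) : List Int :=
  let buckets := (PySem.List.enumerate t).foldl
    (fun (b : PySem.Dict Int (List Int)) p =>
      if 0 ≤ p.2 ∧ p.2 ≤ 10000 then b.modify p.2 [] (fun l => l ++ [p.1]) else b)
    PySem.Dict.empty
  loopB r buckets (PySem.List.sorted buckets.keys (fun x => x) false) [] [] 0

-- ===== PRECONDITION & SPEC =====
-- Pre_ excludes exactly the inputs where Python A raises IndexError: a rider whose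
-- arrival time lies in 0..10000 gets r[idx] looked up, so each such idx needs idx < len(r).
def Pre_solution (t : List Int) (r : List Int) : Prop :=
  ∀ i ∈ List.range t.length, (0 ≤ t.getD i 0 ∧ t.getD i 0 ≤ 10000) → i < r.length
instance (t : List Int) (r : List Int) : Decidable (Pre_solution t r) := by
  unfold Pre_solution; infer_instance

def pvWitness_solution : List Int × List Int := ([0, 2, 2, -1, 20000], [3, 1, 2])

def Spec_solution (t : List Int) (r : List Int) (out : List Int) : Prop := out = solution_alt t r
instance (t : List Int) (r : List Int) (out : List Int) : Decidable (Spec_solution t r out) := by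
  unfold Spec_solution; infer_instance

-- ===== CLAIM (what is proved, stated in full; the proofs are below) =====
def Claim_equal_solution : Prop :=
  ∀ (t : List Int) (r : List Int), Dom_solution t r → Pre_solution t r →
    Spec_solution t r (solution t r)

-- ===== LEMMAS AND PROOFS =====

-- proof-side abbreviations
def enT (t : List Int) : List (Int × Int) := PySem.List.enumerate t
def bkt (t : List Int) (v : Int) : List (Int × Int) := (enT t).filter (fun p => p.2 == v)
def pend (t : List Int) (c : Int) : List (Int × Int) :=
  (enT t).filter (fun p => decide (¬(0 ≤ p.2 ∧ p.2 < c)))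
def bucketsOf (t : List Int) : PySem.Dict Int (List Int) :=
  (PySem.List.enumerate t).foldl
    (fun (b : PySem.Dict Int (List Int)) p =>
      if 0 ≤ p.2 ∧ p.2 ≤ 10000 then b.modify p.2 [] (fun l => l ++ [p.1]) else b)
    PySem.Dict.empty

lemma nodup_keys_enT (t : List Int) : ((enT t).map (·.1)).Nodup := by
  have h := PySem.List.pairwise_lt_enumerate t 0
  have : ((enT t).map (·.1)).Pairwise (· < ·) := (List.pairwise_map).mpr h
  exact this.imp (fun h => Int.ne_of_lt h)

lemma length_siftdownLoop (x : Int × Int × Int) (s : Nat) :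
    ∀ (f p : Nat) (q : List (Int × Int × Int)), (siftdownLoop x s f p q).length = q.length := by
  intro f
  induction f with
  | zero => intro p q; simp [siftdownLoop]
  | succ f ih =>
    intro p q
    simp only [siftdownLoop]
    split_ifs <;> simp [ih]

lemma length_siftupLoop (e : Nat) (x : Int × Int × Int) (s : Nat) :
    ∀ (f p : Nat) (q : List (Int × Int × Int)), (siftupLoop e x s f p q).length = q.length := by
  intro f
  induction f with
  | zero => intro p q; simp [siftupLoop, length_siftdownLoop]
  | succ f ih =>
    intro p q
    simp only [siftupLoop]
    split_ifs <;> simp [ih, length_siftdownLoop]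

lemma length_hpop (q : List (Int × Int × Int)) (h : q ≠ []) :
    (hpop q).2.length = q.length - 1 := by
  have hq : 0 < q.length := List.length_pos_iff.mpr h
  simp only [hpop]
  split
  · rename_i hrest
    rw [List.take_eq_nil_iff] at hrest
    rcases hrest with h1 | h1
    · simp [h1]
    · exact absurd h1 h
  · simp [length_siftupLoop, List.length_take]

lemma drain_step (q : List (Int × Int × Int)) (ans : List Int) (h : q ≠ []) :
    drainAll q ans = drainAll (hpop q).2 (ans ++ [(hpop q).1.2.2]) := by
  have hq : 0 < q.length := List.length_pos_iff.mpr h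
  unfold drainAll
  rw [length_hpop q h]
  obtain ⟨n, hn⟩ : ∃ n, q.length = n + 1 := ⟨q.length - 1, by omega⟩
  rw [hn, Nat.add_sub_cancel]
  simp only [drain, if_neg h]

lemma catchup_nil (f : Nat) (T : Int) (ans : List Int) (cur : Int) :
    catchup f T ans [] cur = (ans, [], cur) := by
  cases f <;> simp [catchup]

lemma catchup_step (f : Nat) (T : Int) (ans : List Int) (q : List (Int × Int × Int))
    (cur : Int) (hq : q ≠ []) (hc : cur < T) :
    catchup (f + 1) T ans q cur
      = catchup f T (ans ++ [(hpop q).1.2.2]) (hpop q).2 (cur + 1) := by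
  simp [catchup, hq, hc]

lemma length_hpush (q : List (Int × Int × Int)) (x : Int × Int × Int) :
    (hpush q x).length = q.length + 1 := by
  simp [hpush, length_siftdownLoop]

lemma length_pushfold {α : Type} (l : List α) (f : α → Int × Int × Int)
    (q : List (Int × Int × Int)) :
    (l.foldl (fun q a => hpush q (f a)) q).length = q.length + l.length := by
  induction l generalizing q with
  | nil => simp
  | cons a l ih => simp [ih, length_hpush]; omega

-- the dict scan of A's inner loop, on a dict with item list L (keys distinct)
lemma scan_eq (r : List Int) (d : PySem.Dict Int Int) (L : List (Int × Int)) (time : Int)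
    (q : List (Int × Int × Int)) (hL : d.items = L) (hnd : (L.map (·.1)).Nodup) :
    d.keys.foldl
      (fun (s : List (Int × Int × Int) × List Int) key =>
        if d.getD key 0 == time then
          (hpush s.1 (PySem.List.pyGetD r key 0, time, key), s.2 ++ [key])
        else s) (q, []) =
    ((L.filter (fun p => p.2 == time)).foldl
        (fun q p => hpush q (PySem.List.pyGetD r p.1 0, time, p.1)) q,
      (L.filter (fun p => p.2 == time)).map (·.1)) := by
  have hkeys : d.keys = L.map (·.1) := by simp [PySem.Dict.keys, hL]
  have hndk : d.keys.Nodup := by rw [hkeys]; exact hnd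
  have hcong : ∀ (acc : List (Int × Int × Int) × List Int), ∀ p ∈ L,
      (if d.getD p.1 0 == time then
        (hpush acc.1 (PySem.List.pyGetD r p.1 0, time, p.1), acc.2 ++ [p.1]) else acc) =
      ((if p.2 == time then hpush acc.1 (PySem.List.pyGetD r p.1 0, time, p.1) else acc.1),
       (if p.2 == time then acc.2 ++ [p.1] else acc.2)) := by
    intro acc p hp
    have hg : d.getD p.1 0 = p.2 := by
      apply PySem.Dict.getD_of_mem_items d _ hndk
      rw [hL]; exact hp
    rw [hg]
    by_cases hb : (p.2 == time) = true <;> simp [hb]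
  rw [hkeys, List.foldl_map]
  rw [PySem.List.foldl_congr_mem L _
    (fun (s : List (Int × Int × Int) × List Int) p =>
      ((if p.2 == time then hpush s.1 (PySem.List.pyGetD r p.1 0, time, p.1) else s.1),
       (if p.2 == time then s.2 ++ [p.1] else s.2))) (q, []) hcong]
  refine Eq.trans (PySem.List.foldl_prod_mk
    (fun q p => if p.2 == time then hpush q (PySem.List.pyGetD r p.1 0, time, p.1) else q)
    (fun a p => if p.2 == time then a ++ [p.1] else a) L q []) ?_
  rw [Prod.mk.injEq]
  constructor
  · exact PySem.List.foldl_if_eq_foldl_filter (fun p => p.2 == time) _ L q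
  · have := PySem.List.foldl_append_if (fun (p : Int × Int) => p.2 == time) (·.1) L []
    simpa using this

lemma foldl_erase_items (ks : List Int) (d : PySem.Dict Int Int) :
    (ks.foldl (fun d k => PySem.Dict.erase d k) d).items
      = d.items.filter (fun p => !(ks.contains p.1)) := by
  induction ks generalizing d with
  | nil => simp
  | cons k ks ih =>
      simp only [List.foldl_cons]
      rw [ih]
      simp only [PySem.Dict.erase, List.filter_filter]
      apply List.filter_congr
      intro p _
      rw [Bool.eq_iff_iff]
      simp
      tauto

lemma pend_zero (t : List Int) : pend t 0 = enT t := by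
  unfold pend
  rw [List.filter_eq_self]
  intro p _
  simp

lemma nodup_pend (t : List Int) (c : Int) : ((pend t c).map (·.1)).Nodup := by
  have h : (pend t c).Sublist (enT t) := List.filter_sublist
  exact (nodup_keys_enT t).sublist (h.map _)

lemma pend_filter_bkt (t : List Int) (c T : Int) (hcT : c ≤ T) :
    (pend t c).filter (fun p => p.2 == T) = bkt t T := by
  unfold pend bkt
  rw [List.filter_filter]
  apply List.filter_congr
  intro p _
  rw [Bool.eq_iff_iff]
  simp; omega

lemma bucketsOf_getD (t : List Int) (T : Int) (h0 : 0 ≤ T) (h1 : T ≤ 10000) :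
    (bucketsOf t).getD T [] = (bkt t T).map (·.1) := by
  unfold bucketsOf
  rw [PySem.List.foldl_ite_eq_foldl_filter
    (p := fun p : Int × Int => 0 ≤ p.2 ∧ p.2 ≤ 10000)]
  rw [show (fun (b : PySem.Dict Int (List Int)) (p : Int × Int) =>
      PySem.Dict.modify b p.2 [] fun l => l ++ [p.1]) =
    (fun (b : PySem.Dict Int (List Int)) (p : Int × Int) =>
      PySem.Dict.modify b p.swap.1 [] fun l => l ++ [p.swap.2]) from rfl]
  rw [← List.foldl_map (f := (Prod.swap : Int × Int → Int × Int))
    (g := fun (d : PySem.Dict Int (List Int)) (p : Int × Int) =>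
      PySem.Dict.modify d p.1 [] fun x => x ++ [p.2])]
  rw [PySem.Dict.getD_foldl_modify_append]
  rw [PySem.Dict.getD_empty]
  simp only [List.nil_append, List.filter_map, List.map_map]
  unfold bkt enT
  rw [List.filter_filter]
  congr 1
  apply List.filter_congr
  intro p _
  rw [Bool.eq_iff_iff]
  simp
  omega

lemma keys_bucketsOf (t : List Int) :
    (bucketsOf t).keys = PySem.Set.ofList
      (((enT t).filter (fun p => decide (0 ≤ p.2 ∧ p.2 ≤ 10000))).map (·.2)) := by
  unfold bucketsOf enT
  rw [PySem.List.foldl_ite_eq_foldl_filter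
    (p := fun p : Int × Int => 0 ≤ p.2 ∧ p.2 ≤ 10000)]
  rw [PySem.Dict.keys_foldl_modify_key _ (fun p : Int × Int => p.2) []
    (fun b p => fun l => l ++ [p.1]) PySem.Dict.empty]
  rw [PySem.Dict.keys_empty, PySem.Set.ofList_eq_foldl]
  rfl

lemma mem_sorted_keys (t : List Int) (x : Int) :
    x ∈ PySem.List.sorted (bucketsOf t).keys (fun x => x) false ↔
      (0 ≤ x ∧ x ≤ 10000 ∧ bkt t x ≠ []) := by
  rw [(PySem.List.sorted_perm (bucketsOf t).keys (fun x => x) false).mem_iff]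
  rw [keys_bucketsOf, PySem.Set.mem_ofList, List.mem_map]
  constructor
  · rintro ⟨p, hp, rfl⟩
    rw [List.mem_filter] at hp
    have hd := hp.2
    simp only [decide_eq_true_eq] at hd
    refine ⟨hd.1, hd.2, ?_⟩
    apply List.ne_nil_of_mem (a := p)
    unfold bkt
    rw [List.mem_filter]
    exact ⟨hp.1, by simp⟩
  · rintro ⟨h0, h1, hne⟩
    obtain ⟨p, hp⟩ := List.exists_mem_of_ne_nil _ hne
    unfold bkt at hp
    rw [List.mem_filter] at hp
    have hpx : p.2 = x := by simpa using hp.2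
    refine ⟨p, ?_, hpx⟩
    rw [List.mem_filter]
    exact ⟨hp.1, by simp [hpx]; omega⟩

lemma pairwise_sorted_keys (t : List Int) :
    List.Pairwise (· < ·) (PySem.List.sorted (bucketsOf t).keys (fun x => x) false) := by
  have hnd : (PySem.List.sorted (bucketsOf t).keys (fun x => x) false).Nodup := by
    rw [(PySem.List.sorted_perm (bucketsOf t).keys (fun x => x) false).nodup_iff]
    rw [keys_bucketsOf]
    exact PySem.Set.nodup_ofList _
  have hle := PySem.List.sorted_pairwise (bucketsOf t).keys (fun x => x)
  exact (hle.and hnd).imp (fun h => lt_of_le_of_ne h.1 h.2)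

-- A's loop over a stretch of times with no arrivals and a non-empty dict only pops
lemma pyRange_ge (a b : Int) (h : b ≤ a) : PySem.List.pyRange a b = [] := by
  refine List.eq_nil_iff_forall_not_mem.mpr (fun x hx => ?_)
  rw [PySem.List.mem_pyRange_one] at hx
  omega

lemma trail (r : List Int) (d : PySem.Dict Int Int)
    (hnd : (d.items.map (·.1)).Nodup) :
    ∀ (k : Nat) (cur : Int) (ans : List Int) (q : List (Int × Int × Int)),
      (10001 - cur).toNat = k → 0 ≤ cur → cur ≤ 10001 →
      (∀ v, cur ≤ v → v < 10001 → d.items.filter (fun p => p.2 == v) = []) →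
      d.items ≠ [] →
      loopA r (PySem.List.pyRange cur 10001) ans d q = drainAll q ans := by
  intro k
  induction k with
  | zero =>
    intro cur ans q hk h0 h1 _ _
    rw [pyRange_ge cur 10001 (by omega)]
    rfl
  | succ k ih =>
    intro cur ans q hk h0 h1 hno hne
    have hlt : cur < 10001 := by omega
    rw [PySem.List.pyRange_one_cons hlt]
    simp only [loopA]
    rw [scan_eq r d d.items cur q rfl hnd, hno cur le_rfl hlt]
    have hsz : ¬ d.size = 0 := by
      simpa [PySem.Dict.size, List.length_eq_zero_iff] using hne
    simp only [List.foldl_nil, List.map_nil, List.reverse_nil, hsz, if_false]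
    by_cases hq : q = []
    · subst hq
      simp only [reduceIte]
      exact ih (cur + 1) ans [] (by omega) (by omega) (by omega)
        (fun v hv1 hv2 => hno v (by omega) hv2) hne
    · simp only [if_neg hq]
      rw [ih (cur + 1) (ans ++ [(hpop q).1.2.2]) (hpop q).2 (by omega) (by omega) (by omega)
        (fun v hv1 hv2 => hno v (by omega) hv2) hne]
      exact (drain_step q ans hq).symm

-- A's loop from `cur` to the next arrival time `cur + k` is B's catch-up loop
lemma inertRun (r : List Int) (d : PySem.Dict Int Int)
    (hnd : (d.items.map (·.1)).Nodup) :
    ∀ (k : Nat) (cur : Int) (ans : List Int) (q : List (Int × Int × Int)),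
      0 ≤ cur → cur + k ≤ 10001 →
      (∀ v, cur ≤ v → v < cur + k → d.items.filter (fun p => p.2 == v) = []) →
      d.items ≠ [] →
      loopA r (PySem.List.pyRange cur 10001) ans d q =
        loopA r (PySem.List.pyRange (cur + k) 10001)
          (catchup k (cur + k) ans q cur).1 d (catchup k (cur + k) ans q cur).2.1 := by
  intro k
  induction k with
  | zero =>
    intro cur ans q h0 h1 hno hne
    rw [show ((0 : Nat) : Int) = 0 from rfl, add_zero]
    rfl
  | succ k ih =>
    intro cur ans q h0 h1 hno hne
    have hcast : cur + ((k + 1 : Nat) : Int) = (cur + 1) + (k : Nat) := by push_cast; ring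
    have hlt : cur < 10001 := by omega
    rw [PySem.List.pyRange_one_cons hlt]
    simp only [loopA]
    rw [scan_eq r d d.items cur q rfl hnd,
      hno cur le_rfl (by omega)]
    have hsz : ¬ d.size = 0 := by
      simpa [PySem.Dict.size, List.length_eq_zero_iff] using hne
    simp only [List.foldl_nil, List.map_nil, List.reverse_nil, hsz, if_false]
    by_cases hq : q = []
    · subst hq
      simp only [reduceIte]
      rw [ih (cur + 1) ans [] (by omega) (by omega)
        (fun v hv1 hv2 => hno v (by omega) (by omega))
        hne]
      rw [hcast, catchup_nil, catchup_nil]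
    · simp only [if_neg hq]
      rw [ih (cur + 1) (ans ++ [(hpop q).1.2.2]) (hpop q).2 (by omega) (by omega)
        (fun v hv1 hv2 => hno v (by omega) (by omega)) hne]
      rw [hcast, ← catchup_step _ _ _ _ _ hq (by omega)]

lemma erase_to_pend (t : List Int) (cur T : Int) (h0 : 0 ≤ cur) (hcT : cur ≤ T)
    (hno : ∀ v, cur ≤ v → v < T → bkt t v = []) :
    (pend t cur).filter (fun p => !((((bkt t T).map (·.1)).reverse).contains p.1))
      = pend t (T + 1) := by
  unfold pend
  rw [List.filter_filter]
  apply List.filter_congr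
  intro p hp
  rw [Bool.eq_iff_iff]
  simp only [Bool.and_eq_true, Bool.not_eq_true', decide_eq_true_eq,
    List.contains_eq_mem, decide_eq_false_iff_not, List.mem_reverse, List.mem_map]
  constructor
  · rintro ⟨hnm, hpc⟩ hcon
    -- p is not among the deleted keys and survived pend cur, so its time is not ≤ T
    rcases hcon with ⟨h1, h2⟩
    by_cases hvT : p.2 = T
    · exact hnm ⟨p, by unfold bkt; rw [List.mem_filter]; exact ⟨hp, by simp [hvT]⟩, rfl⟩
    · have hcurle : cur ≤ p.2 := by omega
      have : bkt t p.2 = [] := hno p.2 hcurle (by omega)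
      have hmem : p ∈ bkt t p.2 := by unfold bkt; rw [List.mem_filter]; exact ⟨hp, by simp⟩
      rw [this] at hmem
      exact absurd hmem (List.not_mem_nil)
  · intro hnot
    constructor
    · rintro ⟨p', hp', hpp⟩
      unfold bkt at hp'; rw [List.mem_filter] at hp'
      have hp'T : p'.2 = T := by simpa using hp'.2
      have heq : p' = p := by
        have hinj := List.inj_on_of_nodup_map (nodup_keys_enT t)
        exact hinj hp'.1 hp hpp
      rw [heq] at hp'T
      exact hnot ⟨by omega, by omega⟩
    · intro hc; exact hnot ⟨hc.1, by omega⟩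

lemma main_run (t r : List Int) :
    ∀ (ks : List Int) (cur : Int) (ans : List Int) (q : List (Int × Int × Int))
      (d : PySem.Dict Int Int),
      0 ≤ cur → cur ≤ 10001 → d.items = pend t cur →
      List.Pairwise (· < ·) ks →
      (∀ x ∈ ks, cur ≤ x ∧ x ≤ 10000 ∧ bkt t x ≠ []) →
      (∀ v, cur ≤ v → v ≤ 10000 → bkt t v ≠ [] → v ∈ ks) →
      loopA r (PySem.List.pyRange cur 10001) ans d q = loopB r (bucketsOf t) ks ans q cur := by
  intro ks
  induction ks with
  | nil =>
    intro cur ans q d h0 h1 hd _ _ hcomp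
    show _ = drainAll q ans
    by_cases hne : d.items = []
    · by_cases hcur : cur < 10001
      · rw [PySem.List.pyRange_one_cons hcur]
        simp only [loopA]
        rw [scan_eq r d d.items cur q rfl (by rw [hd]; exact nodup_pend t cur), hne]
        have hsz : d.size = 0 := by simp [PySem.Dict.size, hne]
        simp only [List.filter_nil, List.foldl_nil, List.map_nil, List.reverse_nil, hsz,
          reduceIte]
        by_cases hq : q = []
        · subst hq; simp only [reduceIte]
        · simp only [if_neg hq]
          exact (drain_step q ans hq).symm
      · rw [pyRange_ge cur 10001 (by omega)]; rfl
    · apply trail r d (by rw [hd]; exact nodup_pend t cur) (10001 - cur).toNat cur ans q rfl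
        h0 h1 _ hne
      intro v hv1 hv2
      by_cases hv3 : v ≤ 10000
      · have hb : bkt t v = [] := by
          by_contra hbb
          exact absurd (hcomp v hv1 hv3 hbb) (List.not_mem_nil)
        rw [hd, pend_filter_bkt t cur v hv1, hb]
      · exact absurd hv2 (by omega)
  | cons T rest ih =>
    intro cur ans q d h0 h1 hd hpw hks hcomp
    obtain ⟨hcT, hT1, hbne⟩ := hks T List.mem_cons_self
    have hrest_lt : ∀ x ∈ rest, T < x := (List.pairwise_cons.mp hpw).1
    have hnoT : ∀ v, cur ≤ v → v < T → bkt t v = [] := by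
      intro v hv1 hv2
      by_contra hbb
      rcases List.mem_cons.mp (hcomp v hv1 (by omega) hbb) with h | h
      · omega
      · exact absurd (hrest_lt v h) (by omega)
    have hne : d.items ≠ [] := by
      rw [hd]
      obtain ⟨p, hp⟩ := List.exists_mem_of_ne_nil _ hbne
      unfold bkt at hp; rw [List.mem_filter] at hp
      have hpT : p.2 = T := by simpa using hp.2
      apply List.ne_nil_of_mem (a := p)
      unfold pend; rw [List.mem_filter]
      refine ⟨hp.1, by simp; omega⟩
    have hinert := inertRun r d (by rw [hd]; exact nodup_pend t cur) (T - cur).toNat cur ans q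
      h0 (by omega) (fun v hv1 hv2 => by
        rw [hd, pend_filter_bkt t cur v hv1]
        exact hnoT v hv1 (by omega)) hne
    rw [show cur + ((T - cur).toNat : Int) = T from by omega] at hinert
    rw [hinert]
    rw [PySem.List.pyRange_one_cons (show T < 10001 by omega)]
    simp only [loopA]
    rw [scan_eq r d d.items T (catchup (T - cur).toNat T ans q cur).2.1 rfl
      (by rw [hd]; exact nodup_pend t cur)]
    rw [hd, pend_filter_bkt t cur T hcT]
    have hd2 : ((((bkt t T).map (·.1)).reverse).foldl
        (fun d k => PySem.Dict.erase d k) d).items = pend t (T + 1) := by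
      rw [foldl_erase_items, hd]
      exact erase_to_pend t cur T h0 hcT hnoT
    have hq2 : (bkt t T).foldl
        (fun q p => hpush q (PySem.List.pyGetD r p.1 0, T, p.1)) (catchup (T - cur).toNat T ans q cur).2.1 ≠ [] := by
      have hl := length_pushfold (bkt t T)
        (fun p => (PySem.List.pyGetD r p.1 0, T, p.1)) (catchup (T - cur).toNat T ans q cur).2.1
      have hbl : 0 < (bkt t T).length := List.length_pos_of_ne_nil hbne
      intro hnil
      rw [hnil] at hl
      simp at hl
      omega
    simp only [if_neg hq2]
    have hB : loopB r (bucketsOf t) (T :: rest) ans q cur =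
        loopB r (bucketsOf t) rest
          ((catchup (T - cur).toNat T ans q cur).1 ++ [(hpop ((bkt t T).foldl
            (fun q p => hpush q (PySem.List.pyGetD r p.1 0, T, p.1))
            (catchup (T - cur).toNat T ans q cur).2.1)).1.2.2])
          (hpop ((bkt t T).foldl
            (fun q p => hpush q (PySem.List.pyGetD r p.1 0, T, p.1))
            (catchup (T - cur).toNat T ans q cur).2.1)).2 (T + 1) := by
      simp only [loopB]
      rw [bucketsOf_getD t T (by omega) hT1, List.foldl_map]
    rw [hB]
    by_cases hsz : ((((bkt t T).map (·.1)).reverse).foldl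
        (fun d k => PySem.Dict.erase d k) d).size = 0
    · have hpend : pend t (T + 1) = [] := by
        have := hsz
        simp only [PySem.Dict.size, hd2] at this
        exact List.length_eq_zero_iff.mp this
      have hrest : rest = [] := by
        by_contra hrr
        obtain ⟨x, hx⟩ := List.exists_mem_of_ne_nil _ hrr
        obtain ⟨_, hx1, hx2⟩ := hks x (List.mem_cons_of_mem _ hx)
        obtain ⟨p, hp⟩ := List.exists_mem_of_ne_nil _ hx2
        unfold bkt at hp; rw [List.mem_filter] at hp
        have hpx : p.2 = x := by simpa using hp.2
        have hTx : T < x := hrest_lt x hx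
        have : p ∈ pend t (T + 1) := by
          unfold pend; rw [List.mem_filter]
          exact ⟨hp.1, by simp; omega⟩
        rw [hpend] at this
        exact absurd this (List.not_mem_nil)
      rw [if_pos hsz, hrest]
      rfl
    · rw [if_neg hsz]
      apply ih (T + 1) _ _ _ (by omega) (by omega) hd2 (List.pairwise_cons.mp hpw).2
      · intro x hx
        obtain ⟨_, hx1, hx2⟩ := hks x (List.mem_cons_of_mem _ hx)
        exact ⟨by have := hrest_lt x hx; omega, hx1, hx2⟩
      · intro v hv1 hv2 hv3
        rcases List.mem_cons.mp (hcomp v (by omega) hv2 hv3) with h | h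
        · omega
        · exact h

-- ===== VERDICT (by name: the statement is the Claim_ definition above) =====
theorem solution_spec : Claim_equal_solution := by
  intro t r _ _
  unfold Spec_solution solution solution_alt
  have hd0 : ((PySem.List.enumerate t).foldl
      (fun (d : PySem.Dict Int Int) p => d.insert p.1 p.2) PySem.Dict.empty).items
      = pend t 0 := by
    rw [PySem.Dict.items_foldl_insert_fresh (PySem.List.enumerate t)
      (fun p => p.1) (fun p => p.2) PySem.Dict.empty
      (fun a _ => PySem.Dict.contains_empty _) (nodup_keys_enT t)]
    rw [pend_zero]
    unfold enT
    simp [PySem.Dict.empty]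
  show loopA r (PySem.List.pyRange 0 10001) [] _ [] =
    loopB r (bucketsOf t) (PySem.List.sorted (bucketsOf t).keys (fun x => x) false) [] [] 0
  apply main_run t r _ 0 [] [] _ le_rfl (by omega) hd0 (pairwise_sorted_keys t)
  · intro x hx
    rw [mem_sorted_keys] at hx
    exact ⟨hx.1, hx.2.1, hx.2.2⟩
  · intro v hv0 hv1 hvb
    rw [mem_sorted_keys]
    exact ⟨hv0, hv1, hvb⟩
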